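-- pv_equiv track=rewrite | github.com/Alekya-Dhandu/TestCaseGenerator | src/formatter.py | _compute_columns
-- ===== SOURCE A (Python) =====
-- from typing import Any, Dict, List, Sequence, Tuple
--
-- def _preferred_columns() -> List[str]:
--     # Stable, import-friendly column set (good default for TestPad-like tools).
--     return [
--         "ID",
--         "Title",
--         "Type",
--         "Priority",
--         "Preconditions",
--         "Steps",
--         "ExpectedResult",
--         "Screen",
--         "Tags",
--     ]
--
-- def _compute_columns(test_cases_list: List[Dict[str, Any]]) -> List[str]:
--     preferred = _preferred_columns()
--     extras: List[str] = []
--     for tc in test_cases_list: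
--         for k in tc.keys():
--             if k not in preferred and k not in extras:
--                 extras.append(k)
--     return preferred + extras
-- ===== SOURCE B (Python) =====
-- from typing import Any, Dict, List
--
-- def _preferred_columns() -> List[str]:
--     return [
--         "ID",
--         "Title",
--         "Type",
--         "Priority",
--         "Preconditions",
--         "Steps",
--         "ExpectedResult",
--         "Screen",
--         "Tags",
--     ]
--
-- def _compute_columns(test_cases_list: List[Dict[str, Any]]) -> List[str]:
--     preferred = _preferred_columns()
--     # flatten all keys into one positional stream
--     stream = [k for tc in test_cases_list for k in tc.keys()]
--     # stateless characterization: a key is an extra column iff it is not a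
--     # preferred column and this position is its FIRST occurrence in the stream
--     extras = [k for i, k in enumerate(stream)
--               if k not in preferred and k not in stream[:i]]
--     return preferred + extras
-- ===== Notes on version B (the rewrite author's own statement) =====
-- stated objective: alternative
-- what changed: Replaces A's stateful nested loop that appends to a growing extras accumulator by a stateless positional filter: flatten all keys into one stream, then keep a key iff it is non-preferred and the position is its first occurrence (k not in stream[:i]); no dedup state is maintained at all.
import Mathlib
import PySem

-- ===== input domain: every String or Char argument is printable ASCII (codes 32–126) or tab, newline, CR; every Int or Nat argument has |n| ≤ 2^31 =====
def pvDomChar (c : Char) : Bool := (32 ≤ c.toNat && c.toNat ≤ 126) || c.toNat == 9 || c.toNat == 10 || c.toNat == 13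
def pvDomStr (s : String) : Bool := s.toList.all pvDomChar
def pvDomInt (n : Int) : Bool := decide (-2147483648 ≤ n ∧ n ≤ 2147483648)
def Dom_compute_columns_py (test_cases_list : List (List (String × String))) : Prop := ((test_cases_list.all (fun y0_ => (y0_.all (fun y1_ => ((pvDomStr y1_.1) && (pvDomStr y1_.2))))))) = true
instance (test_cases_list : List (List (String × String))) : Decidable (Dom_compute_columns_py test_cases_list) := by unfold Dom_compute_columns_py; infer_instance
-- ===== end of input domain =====

-- B replaces A's stateful accumulator loop by a stateless positional filter over the
-- flattened key stream: a key is an extra iff non-preferred and at its first occurrence.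

-- ===== PORT A =====
def preferred_columns_py : List String :=
  ["ID", "Title", "Type", "Priority", "Preconditions", "Steps", "ExpectedResult", "Screen", "Tags"]

def compute_columns_py (test_cases_list : List (List (String × String))) : List String :=
  let preferred := preferred_columns_py
  let extras := test_cases_list.foldl (fun extras tc =>
    tc.foldl (fun extras kv =>
      if kv.1 ∉ preferred ∧ kv.1 ∉ extras then extras ++ [kv.1] else extras) extras) []
  preferred ++ extras

-- ===== PORT B =====
-- stream[:i] with i ≥ 0 ported exactly as PySem.List.slice stream none (some i)
def compute_columns_py_alt (test_cases_list : List (List (String × String))) : List String :=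
  let preferred := preferred_columns_py
  let stream := test_cases_list.flatMap (fun tc => tc.map Prod.fst)
  let extras := ((PySem.List.enumerate stream 0).filter
      (fun p => decide (p.2 ∉ preferred) &&
                decide (p.2 ∉ PySem.List.slice stream none (some p.1)))).map Prod.snd
  preferred ++ extras

-- ===== PRECONDITION & SPEC =====
def Spec_compute_columns_py (test_cases_list : List (List (String × String))) (out : List String) : Prop := out = compute_columns_py_alt test_cases_list
instance (test_cases_list : List (List (String × String))) (out : List String) : Decidable (Spec_compute_columns_py test_cases_list out) := by unfold Spec_compute_columns_py; infer_instance

-- ===== CLAIM =====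
def Claim_equal_compute_columns_py : Prop := ∀ (test_cases_list : List (List (String × String))), Dom_compute_columns_py test_cases_list → Spec_compute_columns_py test_cases_list (compute_columns_py test_cases_list)

-- ===== LEMMAS AND PROOFS =====

-- A's extras-building step, on a single key.
def extStep (acc : List String) (k : String) : List String :=
  if k ∉ preferred_columns_py ∧ k ∉ acc then acc ++ [k] else acc

-- Common specification: the new non-preferred keys produced by a key stream, given keys already seen.
def newExtras (seen : List String) : List String → List String
  | [] => []
  | k :: ks =>
    if k ∈ seen then newExtras seen ks
    else if k ∈ preferred_columns_py then newExtras (seen ++ [k]) ks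
    else k :: newExtras (seen ++ [k]) ks

theorem newExtras_congr (ks : List String) : ∀ (s₁ s₂ : List String),
    (∀ k, k ∈ s₁ ↔ k ∈ s₂) → newExtras s₁ ks = newExtras s₂ ks := by
  induction ks with
  | nil => intro _ _ _; rfl
  | cons k ks ih =>
    intro s₁ s₂ H
    by_cases h1 : k ∈ s₁
    · have h2 : k ∈ s₂ := (H k).mp h1
      simp only [newExtras, if_pos h1, if_pos h2]; exact ih s₁ s₂ H
    · have h2 : k ∉ s₂ := fun h => h1 ((H k).mpr h)
      have H' : ∀ k', k' ∈ s₁ ++ [k] ↔ k' ∈ s₂ ++ [k] := by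
        intro k'; simp only [List.mem_append, List.mem_singleton, H k']
      simp only [newExtras, if_neg h1, if_neg h2]
      by_cases hp : k ∈ preferred_columns_py
      · simp only [if_pos hp]; exact ih _ _ H'
      · simp only [if_neg hp]; exact congrArg _ (ih _ _ H')

-- A's fold equals the common spec, for any accumulator/seen pair agreeing on non-preferred keys.
theorem foldl_extStep_eq (ks : List String) : ∀ (acc seen : List String),
    (∀ k, k ∉ preferred_columns_py → (k ∈ acc ↔ k ∈ seen)) →
    ks.foldl extStep acc = acc ++ newExtras seen ks := by
  induction ks with
  | nil => intro acc seen _; simp [newExtras]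
  | cons k ks ih =>
    intro acc seen H
    by_cases hp : k ∈ preferred_columns_py
    · have hstep : extStep acc k = acc := by simp [extStep, hp]
      by_cases hs : k ∈ seen
      · simp only [List.foldl_cons, hstep, newExtras, if_pos hs]
        exact ih acc seen H
      · simp only [List.foldl_cons, hstep, newExtras, if_neg hs, if_pos hp]
        refine ih acc (seen ++ [k]) ?_
        intro k' hk'
        rw [H k' hk']
        simp only [List.mem_append, List.mem_singleton]
        constructor
        · exact Or.inl
        · rintro (h | rfl)
          · exact h
          · exact absurd hp hk'
    · by_cases ha : k ∈ acc
      · have hs : k ∈ seen := (H k hp).mp ha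
        have hstep : extStep acc k = acc := by simp [extStep, ha]
        simp only [List.foldl_cons, hstep, newExtras, if_pos hs]
        exact ih acc seen H
      · have hs : k ∉ seen := fun h => ha ((H k hp).mpr h)
        have hstep : extStep acc k = acc ++ [k] := by simp [extStep, hp, ha]
        simp only [List.foldl_cons, hstep, newExtras, if_neg hs, if_neg hp]
        rw [ih (acc ++ [k]) (seen ++ [k]) ?_]
        · simp
        · intro k' hk'
          simp only [List.mem_append, List.mem_singleton]
          rw [H k' hk']

-- B's positional first-occurrence filter equals the common spec.
theorem posFilter_eq (stream : List String) (ks : List String) : ∀ (seen : List String),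
    stream = seen ++ ks →
    ((PySem.List.enumerate ks (seen.length : Int)).filter
      (fun p => decide (p.2 ∉ preferred_columns_py) &&
                decide (p.2 ∉ PySem.List.slice stream none (some p.1)))).map Prod.snd
      = newExtras seen ks := by
  induction ks with
  | nil => intro seen _; simp [PySem.List.enumerate_nil, newExtras]
  | cons k ks ih =>
    intro seen h
    have hslice : PySem.List.slice stream none (some ((seen.length : Nat) : Int)) = seen := by
      rw [PySem.List.slice_to_natCast, h]
      simp
    have hrec : ((PySem.List.enumerate ks ((seen ++ [k]).length : Int)).filter
        (fun p => decide (p.2 ∉ preferred_columns_py) &&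
                  decide (p.2 ∉ PySem.List.slice stream none (some p.1)))).map Prod.snd
        = newExtras (seen ++ [k]) ks := by
      refine ih (seen ++ [k]) ?_
      rw [h]; simp
    have hlen : ((seen ++ [k]).length : Int) = (seen.length : Int) + 1 := by
      simp
    rw [PySem.List.enumerate_cons]
    by_cases hs : k ∈ seen
    · have hcond : (decide (k ∉ preferred_columns_py) &&
          decide (k ∉ PySem.List.slice stream none (some (seen.length : Int)))) = false := by
        simp [hslice, hs]
      simp only [List.filter_cons, hcond, Bool.false_eq_true, if_false]
      rw [← hlen, hrec]
      simp only [newExtras, if_pos hs]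
      exact newExtras_congr ks (seen ++ [k]) seen (by
        intro k'; simp only [List.mem_append, List.mem_singleton]
        constructor
        · rintro (h' | rfl); exact h'; exact hs
        · exact Or.inl)
    · by_cases hp : k ∈ preferred_columns_py
      · have hcond : (decide (k ∉ preferred_columns_py) &&
            decide (k ∉ PySem.List.slice stream none (some (seen.length : Int)))) = false := by
          simp [hp]
        simp only [List.filter_cons, hcond, Bool.false_eq_true, if_false]
        rw [← hlen, hrec]
        simp [newExtras, hs, hp]
      · have hcond : (decide (k ∉ preferred_columns_py) &&
            decide (k ∉ PySem.List.slice stream none (some (seen.length : Int)))) = true := by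
          simp [hslice, hs, hp]
        simp only [List.filter_cons, hcond, if_true, List.map_cons]
        rw [← hlen, hrec]
        simp [newExtras, hs, hp]

theorem inner_fold_eq (tc : List (String × String)) (acc : List String) :
    tc.foldl (fun extras kv =>
        if kv.1 ∉ preferred_columns_py ∧ kv.1 ∉ extras then extras ++ [kv.1] else extras) acc
      = (tc.map Prod.fst).foldl extStep acc := by
  rw [List.foldl_map]
  rfl

-- ===== VERDICT =====
theorem compute_columns_py_spec : Claim_equal_compute_columns_py := by
  intro tcl _
  unfold Spec_compute_columns_py
  have hfun : (fun (extras : List String) (tc : List (String × String)) =>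
      tc.foldl (fun extras kv =>
        if kv.1 ∉ preferred_columns_py ∧ kv.1 ∉ extras then extras ++ [kv.1] else extras) extras)
      = fun acc tc => (tc.map Prod.fst).foldl extStep acc :=
    funext fun a => funext fun t => inner_fold_eq t a
  have hA : tcl.foldl (fun extras tc =>
      tc.foldl (fun extras kv =>
        if kv.1 ∉ preferred_columns_py ∧ kv.1 ∉ extras then extras ++ [kv.1] else extras) extras) []
      = (tcl.flatMap (fun tc => tc.map Prod.fst)).foldl extStep [] := by
    rw [List.foldl_flatMap]
    exact congrArg (fun f => List.foldl f ([] : List String) tcl) hfun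
  simp only [compute_columns_py, compute_columns_py_alt]
  rw [hA, foldl_extStep_eq _ [] [] (by simp)]
  have hB := posFilter_eq (tcl.flatMap (fun tc => tc.map Prod.fst))
      (tcl.flatMap (fun tc => tc.map Prod.fst)) [] (by simp)
  simp only [List.length_nil, Nat.cast_zero] at hB
  rw [hB]
  simp
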